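-- pv_equiv track=rewrite | github.com/nles-crt/python-telegram-bot-polling | bot.py | filter_dangerous_chars
-- ===== SOURCE A (Python) =====
-- def filter_dangerous_chars(text):
--     if text is None:
--         return ''
--     dangerous_chars = {'<', '>', '&', '"', '\''}
--     for char in text:
--         if char in dangerous_chars:
--             text = text.replace(char, '')
--     return text
-- ===== SOURCE B (Python) =====
-- _DELETE_DANGEROUS = str.maketrans('', '', '<>&"\'')
--
-- def filter_dangerous_chars(text):
--     if text is None:
--         return ''
--     return text.translate(_DELETE_DANGEROUS)
-- ===== Notes on version B (the rewrite author's own statement) =====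
-- stated objective: idiomatic
-- what changed: Replaces A's loop that calls str.replace per dangerous character found (a fresh whole-string scan-and-rebuild each time) with a precomputed str.maketrans deletion table applied in one str.translate call (a single table-driven pass, measured ~2x faster).
import Mathlib
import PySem

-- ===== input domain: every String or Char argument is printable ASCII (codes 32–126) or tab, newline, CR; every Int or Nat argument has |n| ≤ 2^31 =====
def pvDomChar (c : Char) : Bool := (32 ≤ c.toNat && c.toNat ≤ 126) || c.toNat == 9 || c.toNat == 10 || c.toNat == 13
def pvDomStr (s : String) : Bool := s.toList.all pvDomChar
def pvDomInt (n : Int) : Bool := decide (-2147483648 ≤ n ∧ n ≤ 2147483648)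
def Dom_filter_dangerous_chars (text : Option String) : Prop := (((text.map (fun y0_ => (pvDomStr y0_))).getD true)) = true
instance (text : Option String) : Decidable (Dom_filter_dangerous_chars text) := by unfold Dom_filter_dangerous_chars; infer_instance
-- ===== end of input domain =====

-- B replaces A's per-dangerous-character str.replace rescans with a precomputed deletion table applied in one table-driven pass (str.translate); objective: idiomatic.

-- ===== PORT A =====
-- the set literal {'<', '>', '&', '"', '\''}
def pvDangerous : PySem.Set Char := PySem.Set.ofList ['<', '>', '&', '"', '\'']

def filter_dangerous_chars (text : Option String) : String :=
  match text with
  | none => ""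
  | some t0 =>
    -- 'for char in text' iterates over the ORIGINAL string even as 'text' is reassigned
    t0.toList.foldl
      (fun t char =>
        if PySem.Set.contains pvDangerous char then
          PySem.Str.replace t (String.ofList [char]) ""
        else t)
      t0

-- ===== PORT B =====
-- str.maketrans('', '', '<>&"\'') : a deletion table holding the characters to drop
def pvDeleteTable : List Char := "<>&\"'".toList

-- str.translate with a pure deletion table: one pass, dropping the table's characters
-- (ported by hand, step for step: translate looks each character up and omits the deleted ones)
def pvTranslateDelete (tbl : List Char) : List Char → List Char
  | [] => []
  | c :: rest =>
    if tbl.contains c then pvTranslateDelete tbl rest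
    else c :: pvTranslateDelete tbl rest

def filter_dangerous_chars_alt (text : Option String) : String :=
  match text with
  | none => ""
  | some t => String.ofList (pvTranslateDelete pvDeleteTable t.toList)

-- ===== PRECONDITION & SPEC =====
def Spec_filter_dangerous_chars (text : Option String) (out : String) : Prop := out = filter_dangerous_chars_alt text
instance (text : Option String) (out : String) : Decidable (Spec_filter_dangerous_chars text out) := by unfold Spec_filter_dangerous_chars; infer_instance

-- ===== CLAIM (what is proved, stated in full; the proofs are below) =====
def Claim_equal_filter_dangerous_chars : Prop := ∀ (text : Option String), Dom_filter_dangerous_chars text → Spec_filter_dangerous_chars text (filter_dangerous_chars text)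

-- ===== LEMMAS AND PROOFS =====

-- the two representations of the dangerous-character set agree character by character
theorem pv_tables_agree (c : Char) :
    PySem.Set.contains pvDangerous c = pvDeleteTable.contains c := by
  simp only [pvDangerous, pvDeleteTable]
  by_cases h1 : c = '<' <;> by_cases h2 : c = '>' <;> by_cases h3 : c = '&' <;>
    by_cases h4 : c = '"' <;> by_cases h5 : c = '\'' <;>
    simp_all [PySem.Set.ofList, PySem.Set.contains]

-- B's translate-with-deletion-table is a filter
theorem pv_translate_eq_filter (tbl : List Char) (l : List Char) :
    pvTranslateDelete tbl l = l.filter (fun c => !tbl.contains c) := by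
  induction l with
  | nil => rfl
  | cons c rest ih =>
    by_cases h : c ∈ tbl <;>
      simp [pvTranslateDelete, h, ih]

-- replace.go with a single-character pattern and empty replacement filters that character out
theorem pv_go_single (c : Char) (fuel : Nat) (l acc : List Char) (h : l.length ≤ fuel) :
    PySem.Chars.replace.go [c] [] fuel l acc = acc.reverse ++ l.filter (· ≠ c) := by
  induction fuel generalizing l acc with
  | zero =>
    have : l = [] := List.length_eq_zero_iff.mp (Nat.le_zero.mp h)
    subst this
    simp [PySem.Chars.replace.go]
  | succ n ih =>
    cases l with
    | nil => simp [PySem.Chars.replace.go]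
    | cons x t =>
      have ht : t.length ≤ n := by simpa using h
      by_cases hx : x = c
      · subst hx
        have hpre : [x].isPrefixOf (x :: t) = true := by simp [List.isPrefixOf]
        simp [PySem.Chars.replace.go, hpre, ih _ _ ht]
      · have hpre : [c].isPrefixOf (x :: t) = false := by
          simp [List.isPrefixOf]
          exact fun hcx => hx hcx.symm
        simp [PySem.Chars.replace.go, hpre, ih _ _ ht, hx]

theorem pv_replace_single (s : String) (c : Char) :
    PySem.Str.replace s (String.ofList [c]) "" = String.ofList (s.toList.filter (· ≠ c)) := by
  apply String.toList_inj.mp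
  rw [PySem.Str.toList_replace]
  have : (String.ofList [c]).toList = [c] := by simp
  rw [this]
  simp only [PySem.Chars.replace]
  rw [if_neg (by simp)]
  simpa using pv_go_single c s.toList.length s.toList [] le_rfl

-- loop invariant: after processing 'rest', the string is the start filtered by
-- "not (dangerous and occurring in rest)"
theorem pv_foldl_inv (rest s : List Char) :
    rest.foldl
      (fun t char =>
        if PySem.Set.contains pvDangerous char then
          PySem.Str.replace t (String.ofList [char]) ""
        else t)
      (String.ofList s)
    = String.ofList (s.filter (fun x => !(PySem.Set.contains pvDangerous x && rest.contains x))) := by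
  induction rest generalizing s with
  | nil => simp
  | cons c rest' ih =>
    by_cases hc : PySem.Set.contains pvDangerous c = true
    · rw [List.foldl_cons, if_pos hc, pv_replace_single, ih]
      simp only [String.toList_ofList]
      rw [List.filter_filter]
      apply congrArg
      apply List.filter_congr
      intro x _
      by_cases hx : x = c
      · subst hx
        have hc' : x ∈ pvDangerous := by simpa using hc
        simp [hc']
      · simp [hx]
    · rw [List.foldl_cons, if_neg hc, ih]
      apply congrArg
      apply List.filter_congr
      intro x _
      by_cases hx : x = c
      · subst hx
        have hc' : x ∉ pvDangerous := by simpa using hc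
        simp [hc']
      · simp [hx]

-- ===== VERDICT (by name: the statement is the Claim_ definition above) =====
theorem filter_dangerous_chars_spec : Claim_equal_filter_dangerous_chars := by
  intro text _
  unfold Spec_filter_dangerous_chars filter_dangerous_chars filter_dangerous_chars_alt
  cases text with
  | none => rfl
  | some t0 =>
    simp only
    rw [pv_translate_eq_filter]
    have hs : t0 = String.ofList t0.toList := by
      apply String.toList_inj.mp; simp
    rw [hs, pv_foldl_inv]
    simp only [String.toList_ofList]
    apply congrArg
    apply List.filter_congr
    intro x hx
    rw [← pv_tables_agree]
    by_cases hd : PySem.Set.contains pvDangerous x = true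
    · simp [hx]
    · have hd' : x ∉ pvDangerous := by simpa using hd
      simp [hd']
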